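-- pv_equiv track=rewrite | github.com/probablytukars/LuaQuaternion | docs/HTML.py | escape_formatting
-- ===== SOURCE A (Python) =====
-- def escape_formatting(string):
--     conversion_dict = {
--         r'\*': '&#42;',
--         r'\_': '&#95;',
--         r'\`': '&#96;'
--     }
--
--     for pattern, replacement in conversion_dict.items():
--         string = string.replace(pattern, replacement)
--
--     return string
-- ===== SOURCE B (Python) =====
-- def escape_formatting(string):
--     entities = {'*': '&#42;', '_': '&#95;', '`': '&#96;'}
--     out = []
--     i = 0
--     n = len(string)
--     while i < n:
--         if string[i] == '\\' and i + 1 < n and string[i + 1] in entities: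
--             out.append(entities[string[i + 1]])
--             i += 2
--         else:
--             out.append(string[i])
--             i += 1
--     return ''.join(out)
-- ===== Notes on version B (the rewrite author's own statement) =====
-- stated objective: alternative
-- what changed: Replaced the three sequential full-string str.replace passes with a single left-to-right index scan that emits the entity whenever a backslash is followed by *, _ or `, building the output once; it trades C-level str.replace calls for one explicit Python loop.
import Mathlib
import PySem

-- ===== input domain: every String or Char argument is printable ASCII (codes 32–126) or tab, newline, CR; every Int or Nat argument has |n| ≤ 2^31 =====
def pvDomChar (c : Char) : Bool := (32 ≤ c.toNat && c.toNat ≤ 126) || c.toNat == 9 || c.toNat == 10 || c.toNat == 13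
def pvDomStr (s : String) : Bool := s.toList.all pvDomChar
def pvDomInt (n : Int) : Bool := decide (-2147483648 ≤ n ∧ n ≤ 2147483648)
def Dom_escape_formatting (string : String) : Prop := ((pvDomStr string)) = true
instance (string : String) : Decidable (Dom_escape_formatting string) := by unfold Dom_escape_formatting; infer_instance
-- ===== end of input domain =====

-- B replaces A's three sequential str.replace passes with a single left-to-right scan over the characters (objective: alternative, one pass instead of three).

-- ===== PORT A =====
def escape_formatting (string : String) : String :=
  let conversion_dict : PySem.Dict String String :=
    (((PySem.Dict.empty).insert "\\*" "&#42;").insert "\\_" "&#95;").insert "\\`" "&#96;"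
  conversion_dict.items.foldl (fun s pr => PySem.Str.replace s pr.1 pr.2) string

-- ===== PORT B =====
-- entities lookup: '*'/'_'/'`' ↦ their HTML entity (as a char list)
def escEnt (c : Char) : Option (List Char) :=
  if c = '*' then some ['&', '#', '4', '2', ';']
  else if c = '_' then some ['&', '#', '9', '5', ';']
  else if c = '`' then some ['&', '#', '9', '6', ';']
  else none

-- Source B's while loop over the index, as structural recursion on the remaining chars
def scanEsc : List Char → List Char
  | [] => []
  | c :: t =>
    if c = '\\' then
      match t with
      | [] => [c]
      | c2 :: t2 =>
        match escEnt c2 with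
        | some e => e ++ scanEsc t2
        | none => c :: scanEsc (c2 :: t2)
    else c :: scanEsc t

def escape_formatting_alt (string : String) : String :=
  String.ofList (scanEsc string.toList)

-- ===== PRECONDITION & SPEC =====
def Spec_escape_formatting (string : String) (out : String) : Prop := out = escape_formatting_alt string
instance (string : String) (out : String) : Decidable (Spec_escape_formatting string out) := by unfold Spec_escape_formatting; infer_instance

-- ===== CLAIM (what is proved, stated in full; the proofs are below) =====
def Claim_equal_escape_formatting : Prop := ∀ (string : String), Dom_escape_formatting string → Spec_escape_formatting string (escape_formatting string)

-- ===== LEMMAS AND PROOFS =====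

-- single-pattern replace '\x' -> e : the shape of one str.replace pass with pattern ['\\', x]
def repBS (x : Char) (e : List Char) : List Char → List Char
  | [] => []
  | c :: t =>
    if c = '\\' then
      match t with
      | [] => [c]
      | c2 :: t2 => if c2 = x then e ++ repBS x e t2 else c :: repBS x e (c2 :: t2)
    else c :: repBS x e t

-- small-step rewriting equations for repBS and scanEsc
theorem repBS_cons_ne (x : Char) (e : List Char) (c : Char) (t : List Char) (hc : c ≠ '\\') :
    repBS x e (c :: t) = c :: repBS x e t := by cases t <;> simp [repBS, hc]

theorem repBS_bs_hit (x : Char) (e : List Char) (t : List Char) :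
    repBS x e ('\\' :: x :: t) = e ++ repBS x e t := by simp [repBS]

theorem repBS_bs_miss (x : Char) (e : List Char) (c2 : Char) (t : List Char) (h : c2 ≠ x) :
    repBS x e ('\\' :: c2 :: t) = '\\' :: repBS x e (c2 :: t) := by simp [repBS, h]

theorem scanEsc_cons_ne (c : Char) (t : List Char) (hc : c ≠ '\\') :
    scanEsc (c :: t) = c :: scanEsc t := by cases t <;> simp [scanEsc, hc]

theorem scanEsc_bs_ent (c2 : Char) (e : List Char) (t : List Char) (h : escEnt c2 = some e) :
    scanEsc ('\\' :: c2 :: t) = e ++ scanEsc t := by simp [scanEsc, h]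

theorem scanEsc_bs_none (c2 : Char) (t : List Char) (h : escEnt c2 = none) :
    scanEsc ('\\' :: c2 :: t) = '\\' :: scanEsc (c2 :: t) := by simp [scanEsc, h]

-- PySem.Chars.replace with a two-char pattern '\x' IS repBS
theorem go_eq_repBS (x : Char) (e : List Char) :
    ∀ fuel l acc, l.length ≤ fuel →
      PySem.Chars.replace.go ['\\', x] e fuel l acc = acc.reverse ++ repBS x e l := by
  intro fuel
  induction fuel with
  | zero =>
    intro l acc h
    have hl : l = [] := by cases l <;> simp_all
    subst hl
    rw [PySem.Chars.replace.go]
    simp [repBS]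
  | succ n ih =>
    intro l acc h
    cases l with
    | nil =>
      rw [PySem.Chars.replace.go]
      simp [repBS]
      omega
    | cons c t =>
      rw [PySem.Chars.replace.go]
      by_cases hc : c = '\\'
      · subst hc
        cases t with
        | nil =>
          have hpre : (['\\', x].isPrefixOf ['\\'] ) = false := by simp [List.isPrefixOf]
          simp only [hpre, Bool.false_eq_true, if_false]
          rw [ih [] ('\\' :: acc) (by simp)]
          simp [repBS]
        | cons c2 t2 =>
          by_cases h2 : c2 = x
          · subst h2
            have hpre : (['\\', c2].isPrefixOf ('\\' :: c2 :: t2)) = true := by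
              simp [List.isPrefixOf]
            simp only [hpre, if_true]
            rw [ih _ _ (by simp at h ⊢; omega)]
            simp [repBS_bs_hit]
          · have hpre : (['\\', x].isPrefixOf ('\\' :: c2 :: t2)) = false := by
              simp [List.isPrefixOf, Ne.symm h2]
            simp only [hpre, Bool.false_eq_true, if_false]
            rw [ih _ _ (by simp at h ⊢; omega)]
            rw [repBS_bs_miss x e c2 t2 h2]
            simp
      · have hpre : (['\\', x].isPrefixOf (c :: t)) = false := by
          simp [List.isPrefixOf, Ne.symm hc]
        simp only [hpre, Bool.false_eq_true, if_false]
        rw [ih _ _ (by simp at h ⊢; omega)]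
        rw [repBS_cons_ne x e c t hc]
        simp

theorem replace_eq_repBS (x : Char) (e : List Char) (l : List Char) :
    PySem.Chars.replace l ['\\', x] e = repBS x e l := by
  rw [PySem.Chars.replace]
  simp only [List.isEmpty, Bool.false_eq_true, if_false]
  rw [go_eq_repBS x e l.length l [] (le_refl _)]
  simp

-- a backslash-free prefix passes through a replace pass untouched
theorem repBS_append_of_no_bs (x : Char) (e : List Char) (u v : List Char)
    (hu : '\\' ∉ u) : repBS x e (u ++ v) = u ++ repBS x e v := by
  induction u with
  | nil => simp
  | cons c u' ihu =>
    have hc : c ≠ '\\' := fun h => hu (h ▸ List.mem_cons_self ..)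
    have hu' : '\\' ∉ u' := fun h => hu (List.mem_cons_of_mem _ h)
    rw [List.cons_append, repBS_cons_ne x e c _ hc, ihu hu', List.cons_append]

-- the head of a pass applied to a string starting with a backslash is '\' or '&'
theorem repBS_bs_head (x : Char) (e : List Char) (t : List Char)
    (he : e.head? = some '&') :
    (repBS x e ('\\' :: t)).head? = some '\\' ∨ (repBS x e ('\\' :: t)).head? = some '&' := by
  cases t with
  | nil => left; simp [repBS]
  | cons c2 t2 =>
    by_cases h2 : c2 = x
    · right
      subst h2
      rw [repBS_bs_hit]
      cases e with
      | nil => simp at he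
      | cons a e' => simp at he; simp [he]
    · left; rw [repBS_bs_miss x e c2 t2 h2]; simp

-- 'head is \ or &' is preserved by a pass (for x ∉ {'\', '&'}, entity starting with '&')
theorem repBS_head_good (x : Char) (e : List Char) (m : List Char)
    (_hx2 : x ≠ '&') (he : e.head? = some '&')
    (hm : m.head? = some '\\' ∨ m.head? = some '&') :
    (repBS x e m).head? = some '\\' ∨ (repBS x e m).head? = some '&' := by
  cases m with
  | nil => simp at hm
  | cons c t =>
    simp only [List.head?_cons, Option.some.injEq] at hm
    rcases hm with h | h
    · subst h; exact repBS_bs_head x e t he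
    · subst h
      right
      rw [repBS_cons_ne x e '&' t (by decide)]
      simp

-- a pass leaves a leading backslash alone when the next char cannot be x
theorem repBS_bs_cons (x : Char) (e : List Char) (m : List Char)
    (hx1 : x ≠ '\\') (hx2 : x ≠ '&')
    (hm : m.head? = some '\\' ∨ m.head? = some '&') :
    repBS x e ('\\' :: m) = '\\' :: repBS x e m := by
  cases m with
  | nil => simp [repBS]
  | cons c t =>
    simp only [List.head?_cons, Option.some.injEq] at hm
    rcases hm with h | h <;> subst h
    · exact repBS_bs_miss x e '\\' t (fun hh => hx1 hh.symm)
    · exact repBS_bs_miss x e '&' t (fun hh => hx2 hh.symm)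

-- main equivalence: the three passes compose to the single scan
theorem main_bounded : ∀ (n : Nat) (l : List Char), l.length ≤ n →
    repBS '`' ['&','#','9','6',';'] (repBS '_' ['&','#','9','5',';']
      (repBS '*' ['&','#','4','2',';'] l)) = scanEsc l := by
  intro n
  induction n with
  | zero =>
    intro l h
    have hl : l = [] := by cases l <;> simp_all
    subst hl
    simp [repBS, scanEsc]
  | succ n ih =>
    intro l h
    cases l with
    | nil => simp [repBS, scanEsc]
    | cons c t =>
      by_cases hc : c = '\\'
      · subst hc
        cases t with
        | nil => simp [repBS, scanEsc]
        | cons c2 t2 =>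
          have ht2 : t2.length ≤ n := by simp at h; omega
          by_cases h2 : c2 = '*'
          · subst h2
            rw [repBS_bs_hit,
                repBS_append_of_no_bs '_' _ _ _ (by decide),
                repBS_append_of_no_bs '`' _ _ _ (by decide), ih t2 ht2,
                scanEsc_bs_ent '*' ['&','#','4','2',';'] t2 (by decide)]
          · by_cases h3 : c2 = '_'
            · subst h3
              rw [repBS_bs_miss _ _ _ _ h2, repBS_cons_ne _ _ '_' t2 (by decide),
                  repBS_bs_hit,
                  repBS_append_of_no_bs '`' _ _ _ (by decide), ih t2 ht2,
                  scanEsc_bs_ent '_' ['&','#','9','5',';'] t2 (by decide)]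
            · by_cases h4 : c2 = '`'
              · subst h4
                rw [repBS_bs_miss _ _ _ _ h2, repBS_cons_ne _ _ '`' t2 (by decide),
                    repBS_bs_miss _ _ _ _ (by decide : ('`' : Char) ≠ '_'),
                    repBS_cons_ne _ _ '`' _ (by decide),
                    repBS_bs_hit, ih t2 ht2,
                    scanEsc_bs_ent '`' ['&','#','9','6',';'] t2 (by decide)]
              · by_cases h5 : c2 = '\\'
                · subst h5
                  -- backslash followed by backslash
                  have hm1good := repBS_bs_head '*' ['&','#','4','2',';'] t2 (by decide)
                  have hm2good := repBS_head_good '_' ['&','#','9','5',';'] _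
                    (by decide) (by decide) hm1good
                  rw [repBS_bs_miss _ _ _ _ (by decide : ('\\' : Char) ≠ '*'),
                      repBS_bs_cons '_' _ _ (by decide) (by decide) hm1good,
                      repBS_bs_cons '`' _ _ (by decide) (by decide) hm2good,
                      ih ('\\' :: t2) (by simp at h ⊢; omega),
                      scanEsc_bs_none '\\' t2 (by decide)]
                · -- ordinary char after the backslash
                  rw [repBS_bs_miss _ _ _ _ h2, repBS_cons_ne _ _ c2 t2 h5,
                      repBS_bs_miss _ _ _ _ h3, repBS_cons_ne _ _ c2 _ h5,
                      repBS_bs_miss _ _ _ _ h4, repBS_cons_ne _ _ c2 _ h5,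
                      ih t2 ht2,
                      scanEsc_bs_none c2 t2 (by simp [escEnt, h2, h3, h4]),
                      scanEsc_cons_ne c2 t2 h5]
      · have ht : t.length ≤ n := by simp at h; omega
        rw [repBS_cons_ne _ _ c t hc, repBS_cons_ne _ _ c _ hc, repBS_cons_ne _ _ c _ hc,
            ih t ht, scanEsc_cons_ne c t hc]

-- ===== VERDICT (by name: the statement is the Claim_ definition above) =====
theorem escape_formatting_spec : Claim_equal_escape_formatting := by
  intro s _
  show escape_formatting s = escape_formatting_alt s
  have hA : escape_formatting s =
      PySem.Str.replace (PySem.Str.replace (PySem.Str.replace s "\\*" "&#42;") "\\_" "&#95;")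
        "\\`" "&#96;" := by
    simp [escape_formatting, PySem.Dict.empty, PySem.Dict.insert]
  have hB : PySem.Str.replace (PySem.Str.replace (PySem.Str.replace s "\\*" "&#42;") "\\_" "&#95;")
        "\\`" "&#96;" =
      String.ofList (repBS '`' ['&','#','9','6',';'] (repBS '_' ['&','#','9','5',';']
        (repBS '*' ['&','#','4','2',';'] s.toList))) := by
    simp only [PySem.Str.replace, String.toList_ofList]
    rw [show ("\\*" : String).toList = ['\\', '*'] by decide,
        show ("\\_" : String).toList = ['\\', '_'] by decide,
        show ("\\`" : String).toList = ['\\', '`'] by decide,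
        show ("&#42;" : String).toList = ['&','#','4','2',';'] by decide,
        show ("&#95;" : String).toList = ['&','#','9','5',';'] by decide,
        show ("&#96;" : String).toList = ['&','#','9','6',';'] by decide,
        replace_eq_repBS, replace_eq_repBS, replace_eq_repBS]
  rw [hA, hB, main_bounded s.toList.length s.toList (le_refl _)]
  rfl
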